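-- pv_equiv track=rewrite | github.com/wirenboard/wb-device-manager | wb/device_manager/main.py | _get_all_uart_params
-- ===== SOURCE A (Python) =====
-- def _get_all_uart_params(
--
--     bds=[9600, 115200, 57600, 1200, 2400, 4800, 19200, 38400],
--     parities=["N", "E", "O"],
--     stopbits=[2, 1],
-- ):
--     """There are the following assumptions:
--     1. Most frequently used baudrates are 9600, 115200, 57600
--     2. Most frequently used parity is "N"
--     So, yield them first, then yield less frequently used baudrates and parities
--     """
--     len_iterable = len(bds) * len(parities) * len(stopbits)
--     pos = 0
--     most_frequent_bds, less_frequent_bds = bds[:3], bds[3:]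
--     for parity in parities:
--         for stopbit in stopbits:
--             for bd in most_frequent_bds:
--                 pos += 1
--                 yield bd, parity, stopbit, int(pos / len_iterable * 100)
--         for stopbit in stopbits:
--             for bd in less_frequent_bds:
--                 pos += 1
--                 yield bd, parity, stopbit, int(pos / len_iterable * 100)
-- ===== SOURCE B (Python) =====
-- def _get_all_uart_params(
--     bds=[9600, 115200, 57600, 1200, 2400, 4800, 19200, 38400],
--     parities=["N", "E", "O"],
--     stopbits=[2, 1],
-- ):
--     """Same priority order as the original, but computed by pure index
--     arithmetic: the k-th combination is decoded from k with divmod instead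
--     of threading nested loops and a position counter."""
--     nb, npar, ns = len(bds), len(parities), len(stopbits)
--     total = nb * npar * ns
--     m = min(3, nb)          # size of the most-frequent baudrate group
--     low = nb - m            # size of the less-frequent group
--     for k in range(total):
--         p, r = divmod(k, ns * nb)
--         if r < ns * m:
--             s, i = divmod(r, m)
--             bd = bds[i]
--         else:
--             s, i = divmod(r - ns * m, low)
--             bd = bds[m + i]
--         yield bd, parities[p], stopbits[s], int((k + 1) / total * 100)
-- ===== Notes on version B (the rewrite author's own statement) =====
-- stated objective: alternative
-- what changed: Replaces the nested parity/stopbit/baudrate loops threading a running position counter with a single pass over range(total) that decodes each combination (parity, group, stopbit, baudrate) from its index by divmod arithmetic.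
import Mathlib
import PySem

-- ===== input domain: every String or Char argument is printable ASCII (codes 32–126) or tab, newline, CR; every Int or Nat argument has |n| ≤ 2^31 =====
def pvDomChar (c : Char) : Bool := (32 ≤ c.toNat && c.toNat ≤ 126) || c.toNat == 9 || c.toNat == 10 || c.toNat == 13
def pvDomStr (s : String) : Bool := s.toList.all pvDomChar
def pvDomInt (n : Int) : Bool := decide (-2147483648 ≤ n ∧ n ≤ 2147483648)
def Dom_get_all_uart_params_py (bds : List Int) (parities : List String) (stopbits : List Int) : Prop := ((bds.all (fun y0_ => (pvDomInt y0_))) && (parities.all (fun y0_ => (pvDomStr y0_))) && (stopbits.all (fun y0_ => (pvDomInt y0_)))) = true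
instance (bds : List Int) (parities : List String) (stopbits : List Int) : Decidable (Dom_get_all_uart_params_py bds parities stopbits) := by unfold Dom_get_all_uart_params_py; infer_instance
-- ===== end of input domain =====

-- B rebuilds the same priority sequence by pure index arithmetic (divmod decode over one range)
-- instead of A's nested loops threading a position counter; objective: alternative decomposition.

-- Exact model of CPython's `int(pos / total * 100)` for pos, total ≥ 1 (IEEE-754 double:
-- round-to-nearest-even division, exact ×100 then rounding, truncation); shared by both ports
-- because both Python sources contain this very expression.
-- pvRoundRat p q = the double nearest to p/q, as (mantissa m, scale t) with value m * 2^(-t).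
def pvRoundRat (p q : Nat) : Nat × Int :=
  let c : Int := (PySem.Int.bitLength (p : Int) : Int) - (PySem.Int.bitLength (q : Int) : Int)
  let ge : Bool := if 0 ≤ c then decide (q * 2 ^ c.toNat ≤ p) else decide (q ≤ p * 2 ^ (-c).toNat)
  let e : Int := if ge then c else c - 1
  let t : Int := 52 - e
  let N : Nat := p * 2 ^ t.toNat
  let D : Nat := q * 2 ^ (-t).toNat
  let m0 : Nat := N / D
  let r : Nat := N % D
  (if D < 2 * r ∨ (2 * r = D ∧ m0 % 2 = 1) then m0 + 1 else m0, t)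

def pvPct (pos total : Int) : Int :=
  let d1 := pvRoundRat pos.toNat total.toNat
  let d2 := pvRoundRat (d1.1 * 100 * 2 ^ (-d1.2).toNat) (2 ^ (d1.2).toNat)
  ((if 0 ≤ d2.2 then d2.1 / 2 ^ (d2.2).toNat else d2.1 * 2 ^ (-d2.2).toNat : Nat) : Int)

-- ===== PORT A =====
-- literal transliteration: nested foldl loops threading (yielded list, pos)
def get_all_uart_params_py (bds : List Int) (parities : List String) (stopbits : List Int) : List (Int × String × Int × Int) :=
  let len_iterable : Int := (bds.length : Int) * (parities.length : Int) * (stopbits.length : Int)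
  let most_frequent_bds := PySem.List.slice bds none (some 3)
  let less_frequent_bds := PySem.List.slice bds (some 3) none
  (parities.foldl (fun st parity =>
      let st := stopbits.foldl (fun st stopbit =>
        most_frequent_bds.foldl (fun (st : List (Int × String × Int × Int) × Int) bd =>
          (st.1 ++ [(bd, parity, stopbit, pvPct (st.2 + 1) len_iterable)], st.2 + 1)) st) st
      stopbits.foldl (fun st stopbit =>
        less_frequent_bds.foldl (fun (st : List (Int × String × Int × Int) × Int) bd =>
          (st.1 ++ [(bd, parity, stopbit, pvPct (st.2 + 1) len_iterable)], st.2 + 1)) st) st)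
    (([] : List (Int × String × Int × Int)), (0 : Int))).1

-- ===== PORT B =====
-- literal transliteration of Source B: one range, each combination decoded from its index k by divmod
-- (indices are always in range, so pyGetD's default is never produced)
def get_all_uart_params_py_alt (bds : List Int) (parities : List String) (stopbits : List Int) : List (Int × String × Int × Int) :=
  let nb : Int := (bds.length : Int)
  let np : Int := (parities.length : Int)
  let ns : Int := (stopbits.length : Int)
  let total : Int := nb * np * ns
  let m : Int := min 3 nb
  let low : Int := nb - m
  (PySem.List.pyRange 0 total 1).map (fun k =>
    let p := PySem.Int.floordiv k (ns * nb)
    let r := PySem.Int.mod k (ns * nb)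
    let sbd : Int × Int :=
      if r < ns * m then
        (PySem.Int.floordiv r m, PySem.List.pyGetD bds (PySem.Int.mod r m) 0)
      else
        (PySem.Int.floordiv (r - ns * m) low, PySem.List.pyGetD bds (m + PySem.Int.mod (r - ns * m) low) 0)
    (sbd.2, PySem.List.pyGetD parities p "", PySem.List.pyGetD stopbits sbd.1 0, pvPct (k + 1) total))

-- ===== PRECONDITION & SPEC =====
def Spec_get_all_uart_params_py (bds : List Int) (parities : List String) (stopbits : List Int) (out : List (Int × String × Int × Int)) : Prop := out = get_all_uart_params_py_alt bds parities stopbits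
instance (bds : List Int) (parities : List String) (stopbits : List Int) (out : List (Int × String × Int × Int)) : Decidable (Spec_get_all_uart_params_py bds parities stopbits out) := by unfold Spec_get_all_uart_params_py; infer_instance

-- ===== CLAIM (what is proved, stated in full; the proofs are below) =====
def Claim_equal_get_all_uart_params_py : Prop := ∀ (bds : List Int) (parities : List String) (stopbits : List Int), Dom_get_all_uart_params_py bds parities stopbits → Spec_get_all_uart_params_py bds parities stopbits (get_all_uart_params_py bds parities stopbits)

-- ===== LEMMAS AND PROOFS =====

lemma pvFoldBd (g : List Int) (parity : String) (sb : Int) (total : Int)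
    (acc : List (Int×String×Int×Int)) (pos : Int) :
    g.foldl (fun (st : List (Int×String×Int×Int) × Int) bd =>
        (st.1 ++ [(bd, parity, sb, pvPct (st.2+1) total)], st.2+1)) (acc, pos)
    = (acc ++ (List.range g.length).map
        (fun bi => (g.getD bi 0, parity, sb, pvPct (pos+(bi:Int)+1) total)),
       pos + (g.length : Int)) := by
  induction g generalizing acc pos with
  | nil => simp
  | cons x g ih =>
    rw [List.foldl_cons, ih]
    refine Prod.ext ?_ (by simp; omega)
    simp only [List.length_cons, List.range_succ_eq_map, List.map_cons, List.map_map]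
    simp only [List.getD_cons_zero, List.append_assoc, List.singleton_append, Nat.cast_zero]
    refine congrArg _ ?_
    refine List.cons_eq_cons.mpr ⟨by norm_num, List.map_congr_left ?_⟩
    intro bi _
    simp only [Function.comp_apply, List.getD_cons_succ]
    have : pos + 1 + (bi:Int) + 1 = pos + ((bi:Int)+1) + 1 := by ring
    rw [show ((bi+1:Nat):Int) = (bi:Int)+1 by push_cast; ring, ← this]


lemma pvFoldSb (ss : List Int) (g : List Int) (parity : String) (total : Int)
    (acc : List (Int×String×Int×Int)) (pos : Int) :
    ss.foldl (fun st sb => g.foldl (fun (st : List (Int×String×Int×Int) × Int) bd =>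
        (st.1 ++ [(bd, parity, sb, pvPct (st.2+1) total)], st.2+1)) st) (acc, pos)
    = (acc ++ (List.range ss.length).flatMap (fun si => (List.range g.length).map (fun bi =>
          (g.getD bi 0, parity, ss.getD si 0, pvPct (pos + ((si*g.length+bi : Nat):Int) + 1) total))),
       pos + ((ss.length * g.length : Nat):Int)) := by
  induction ss generalizing acc pos with
  | nil => simp
  | cons sb ss ih =>
    rw [List.foldl_cons, pvFoldBd, ih]
    refine Prod.ext ?_ (by simp; ring_nf)
    simp only [List.length_cons, List.range_succ_eq_map, List.flatMap_cons, List.flatMap_map,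
      List.getD_cons_zero, List.getD_cons_succ, List.append_assoc]
    refine congrArg _ ?_
    refine congrArg₂ _ (List.map_congr_left ?_) (List.flatMap_congr ?_)
    · intro bi _
      simp only [Prod.mk.injEq]
      refine ⟨trivial, trivial, trivial, ?_⟩
      congr 1
      push_cast; ring
    · intro si _
      refine List.map_congr_left ?_
      intro bi _
      simp only [Prod.mk.injEq]
      refine ⟨trivial, trivial, trivial, ?_⟩
      congr 1
      push_cast; ring

lemma pvFoldPar (ps : List String) (mf lf ss : List Int) (total : Int)
    (acc : List (Int×String×Int×Int)) (pos : Int) :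
    ps.foldl (fun st parity =>
      let st := ss.foldl (fun st sb => mf.foldl (fun (st : List (Int×String×Int×Int) × Int) bd =>
        (st.1 ++ [(bd, parity, sb, pvPct (st.2+1) total)], st.2+1)) st) st
      ss.foldl (fun st sb => lf.foldl (fun (st : List (Int×String×Int×Int) × Int) bd =>
        (st.1 ++ [(bd, parity, sb, pvPct (st.2+1) total)], st.2+1)) st) st) (acc, pos)
    = (acc ++ (List.range ps.length).flatMap (fun pi =>
        (List.range ss.length).flatMap (fun si => (List.range mf.length).map (fun bi =>
          (mf.getD bi 0, ps.getD pi "", ss.getD si 0,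
            pvPct (pos + ((pi*(ss.length*(mf.length+lf.length)) + si*mf.length + bi : Nat):Int) + 1) total))) ++
        (List.range ss.length).flatMap (fun si => (List.range lf.length).map (fun bi =>
          (lf.getD bi 0, ps.getD pi "", ss.getD si 0,
            pvPct (pos + ((pi*(ss.length*(mf.length+lf.length)) + ss.length*mf.length + si*lf.length + bi : Nat):Int) + 1) total)))),
       pos + ((ps.length * (ss.length*(mf.length+lf.length)) : Nat):Int)) := by
  induction ps generalizing acc pos with
  | nil => simp
  | cons parity ps ih =>
    rw [List.foldl_cons]
    show (ps.foldl _ (ss.foldl _ (ss.foldl _ (acc, pos)))) = _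
    rw [pvFoldSb, pvFoldSb, ih]
    refine Prod.ext ?_ (by simp; ring_nf)
    simp only [List.length_cons, List.range_succ_eq_map, List.flatMap_cons, List.flatMap_map,
      List.getD_cons_zero, List.getD_cons_succ, List.append_assoc]
    refine congrArg _ ?_
    refine congrArg₂ (· ++ ·) (List.flatMap_congr ?_) (congrArg₂ (· ++ ·) (List.flatMap_congr ?_) (List.flatMap_congr ?_))
    · intro si _
      refine List.map_congr_left ?_
      intro bi _
      simp only [Prod.mk.injEq]
      refine ⟨trivial, trivial, trivial, ?_⟩
      congr 1
      push_cast; ring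
    · intro si _
      refine List.map_congr_left ?_
      intro bi _
      simp only [Prod.mk.injEq]
      refine ⟨trivial, trivial, trivial, ?_⟩
      congr 1
      push_cast; ring
    · intro pi _
      refine congrArg₂ (· ++ ·) (List.flatMap_congr ?_) (List.flatMap_congr ?_) <;>
      · intro si _
        refine List.map_congr_left ?_
        intro bi _
        simp only [Prod.mk.injEq]
        refine ⟨trivial, trivial, trivial, ?_⟩
        congr 1
        push_cast; ring

def pvCanon (bds : List Int) (parities : List String) (stopbits : List Int) : List (Int × String × Int × Int) :=
  let Bn := bds.length; let Pn := parities.length; let Sn := stopbits.length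
  let mN := min 3 Bn; let lN := Bn - 3
  let T : Int := (Bn : Int) * (Pn : Int) * (Sn : Int)
  (List.range Pn).flatMap (fun pi =>
    (List.range Sn).flatMap (fun si => (List.range mN).map (fun bi =>
      (bds.getD bi 0, parities.getD pi "", stopbits.getD si 0,
        pvPct (((pi*(Sn*Bn) + si*mN + bi : Nat) : Int) + 1) T))) ++
    (List.range Sn).flatMap (fun si => (List.range lN).map (fun bi =>
      (bds.getD (mN + bi) 0, parities.getD pi "", stopbits.getD si 0,
        pvPct (((pi*(Sn*Bn) + Sn*mN + si*lN + bi : Nat) : Int) + 1) T))))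

lemma pvAEq (bds : List Int) (parities : List String) (stopbits : List Int) :
    get_all_uart_params_py bds parities stopbits = pvCanon bds parities stopbits := by
  unfold get_all_uart_params_py pvCanon
  rw [PySem.List.slice_to bds (by norm_num), PySem.List.slice_from bds (by norm_num)]
  simp only [show (3:Int).toNat = 3 from rfl]
  rw [pvFoldPar]
  simp only [ List.length_take, List.length_drop, List.nil_append, zero_add]
  have hsum : min 3 bds.length + (bds.length - 3) = bds.length := by omega
  simp only [hsum]
  refine List.flatMap_congr ?_
  intro pi hpi
  refine congrArg₂ (· ++ ·) (List.flatMap_congr ?_) (List.flatMap_congr ?_) <;> intro si hsi <;>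
    refine List.map_congr_left ?_ <;> intro bi hbi <;> rw [List.mem_range] at hbi
  · have h3 : bi < 3 := by omega
    have : (List.take 3 bds).getD bi 0 = bds.getD bi 0 := by
      simp [List.getD_eq_getElem?_getD, h3]
    rw [this]
  · have h3 : (3 : Nat) ≤ bds.length := by omega
    have hmin : min 3 bds.length = 3 := by omega
    have : (List.drop 3 bds).getD bi 0 = bds.getD (min 3 bds.length + bi) 0 := by
      simp [List.getD_eq_getElem?_getD, List.getElem?_drop, hmin]
    rw [this]

lemma nat_div_mod_decomp (p r d : Nat) (h : r < d) :
    (p*d + r)/d = p ∧ (p*d + r)%d = r := by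
  constructor
  · rw [Nat.add_comm, Nat.mul_comm, Nat.add_mul_div_left _ _ (by omega), Nat.div_eq_of_lt h, Nat.zero_add]
  · rw [Nat.add_comm, Nat.mul_comm, Nat.add_mul_mod_self_left, Nat.mod_eq_of_lt h]

lemma range_mul_flatMap {α : Type} (a b : Nat) (f : Nat → α) :
    (List.range (a*b)).map f = (List.range a).flatMap (fun i => (List.range b).map (fun j => f (i*b+j))) := by
  induction a with
  | zero => simp
  | succ a ih =>
    rw [Nat.succ_mul, List.range_add, List.map_append, ih, List.range_succ, List.flatMap_append]
    simp [List.map_map, Nat.add_comm]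

lemma range_split_map {α : Type} (x y n : Nat) (h : n = x + y) (f : Nat → α) :
    (List.range n).map f = (List.range x).map f ++ (List.range y).map (fun j => f (x + j)) := by
  subst h
  rw [List.range_add, List.map_append, List.map_map]
  rfl

lemma pvBEq (bds : List Int) (parities : List String) (stopbits : List Int) :
    get_all_uart_params_py_alt bds parities stopbits = pvCanon bds parities stopbits := by
  unfold get_all_uart_params_py_alt pvCanon
  simp only [PySem.List.pyRange_one, Int.sub_zero]
  rw [show (((bds.length:Int) * (parities.length:Int) * (stopbits.length:Int)).toNat)
        = parities.length * (stopbits.length * bds.length) from by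
      rw [show ((bds.length:Int) * (parities.length:Int) * (stopbits.length:Int))
            = ((bds.length * parities.length * stopbits.length : Nat) : Int) from by push_cast; ring]
      rw [Int.toNat_natCast]; ring]
  rw [List.map_map, range_mul_flatMap]
  refine List.flatMap_congr ?_
  intro pi hpi
  rw [List.mem_range] at hpi
  rw [range_split_map (stopbits.length * (min 3 bds.length)) (stopbits.length * (bds.length - 3))
        (stopbits.length * bds.length) (by rw [← Nat.mul_add]; exact congrArg _ (by omega)) _]
  rw [range_mul_flatMap, range_mul_flatMap]
  refine congrArg₂ (· ++ ·) (List.flatMap_congr ?_) (List.flatMap_congr ?_) <;> intro si hsi <;>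
    refine List.map_congr_left ?_ <;> intro bi hbi <;> rw [List.mem_range] at hsi hbi
  · -- most-frequent block
    have hB : 0 < bds.length := by omega
    have hS : 0 < stopbits.length := by omega
    have hm : 0 < min 3 bds.length := by omega
    have hr : si * min 3 bds.length + bi < stopbits.length * bds.length := by
      calc si * min 3 bds.length + bi < (si+1) * min 3 bds.length := by rw [Nat.succ_mul]; omega
        _ ≤ stopbits.length * min 3 bds.length := Nat.mul_le_mul_right _ (by omega)
        _ ≤ stopbits.length * bds.length := Nat.mul_le_mul_left _ (by omega)
    simp only [Function.comp_apply, zero_add]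
    have e1 : ((stopbits.length:Int) * (bds.length:Int)) = ((stopbits.length * bds.length : Nat) : Int) := by push_cast; ring
    have e2 : (min 3 ((bds.length : Nat):Int)) = ((min 3 bds.length : Nat) : Int) := by simp
    rw [e1, e2]
    rw [show ((stopbits.length:Int) * ((min 3 bds.length : Nat):Int)) = ((stopbits.length * min 3 bds.length : Nat):Int) from by push_cast; ring]
    simp only [PySem.Int.floordiv_natCast, PySem.Int.mod_natCast, PySem.List.pyGetD_natCast, Nat.cast_lt]
    rw [(nat_div_mod_decomp pi (si * min 3 bds.length + bi) _ hr).1,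
        (nat_div_mod_decomp pi (si * min 3 bds.length + bi) _ hr).2]
    have hlt : si * min 3 bds.length + bi < stopbits.length * min 3 bds.length := by
      calc si * min 3 bds.length + bi < (si+1) * min 3 bds.length := by rw [Nat.succ_mul]; omega
        _ ≤ stopbits.length * min 3 bds.length := Nat.mul_le_mul_right _ (by omega)
    rw [if_pos hlt]
    rw [(nat_div_mod_decomp si bi _ hbi).1, (nat_div_mod_decomp si bi _ hbi).2]
    rw [← Nat.add_assoc]
    simp [PySem.List.pyGetD_natCast]
  · -- less-frequent block
    have hB : 3 < bds.length := by omega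
    have hS : 0 < stopbits.length := by omega
    have hmin : min 3 bds.length = 3 := by omega
    have hr : si * (bds.length - 3) + bi < stopbits.length * (bds.length - 3) := by
      calc si * (bds.length - 3) + bi < (si+1) * (bds.length - 3) := by rw [Nat.succ_mul]; omega
        _ ≤ stopbits.length * (bds.length - 3) := Nat.mul_le_mul_right _ (by omega)
    have hr2 : stopbits.length * min 3 bds.length + (si * (bds.length - 3) + bi) < stopbits.length * bds.length := by
      rw [show stopbits.length * bds.length = stopbits.length * min 3 bds.length + stopbits.length * (bds.length - 3) from by
        rw [← Nat.mul_add]; exact congrArg _ (by omega)]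
      omega
    simp only [Function.comp_apply, zero_add]
    have e1 : ((stopbits.length:Int) * (bds.length:Int)) = ((stopbits.length * bds.length : Nat) : Int) := by push_cast; ring
    have e2 : (min 3 ((bds.length : Nat):Int)) = ((min 3 bds.length : Nat) : Int) := by simp
    rw [e1, e2]
    rw [show ((stopbits.length:Int) * ((min 3 bds.length : Nat):Int)) = ((stopbits.length * min 3 bds.length : Nat):Int) from by push_cast; ring]
    simp only [PySem.Int.floordiv_natCast, PySem.Int.mod_natCast, PySem.List.pyGetD_natCast, Nat.cast_lt]
    rw [(nat_div_mod_decomp pi _ _ hr2).1, (nat_div_mod_decomp pi _ _ hr2).2]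
    rw [if_neg (by omega)]
    rw [show (((stopbits.length * min 3 bds.length + (si * (bds.length - 3) + bi) : Nat) : Int) - ((stopbits.length * min 3 bds.length : Nat) : Int)) = ((si * (bds.length - 3) + bi : Nat) : Int) from by push_cast; omega]
    rw [show ((bds.length : Int) - ((min 3 bds.length : Nat) : Int)) = ((bds.length - 3 : Nat) : Int) from by push_cast [hmin]; omega]
    simp only [PySem.Int.floordiv_natCast, PySem.Int.mod_natCast]
    rw [(nat_div_mod_decomp si bi _ hbi).1, (nat_div_mod_decomp si bi _ hbi).2]
    rw [show (((min 3 bds.length : Nat) : Int) + (bi : Int)) = ((min 3 bds.length + bi : Nat) : Int) from by push_cast; omega]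
    simp only [PySem.List.pyGetD_natCast]
    rw [show (pi * (stopbits.length * bds.length) + (stopbits.length * min 3 bds.length + (si * (bds.length - 3) + bi)) : Nat) = (pi * (stopbits.length * bds.length) + stopbits.length * min 3 bds.length + si * (bds.length - 3) + bi : Nat) from by omega]

-- ===== VERDICT (by name: the statement is the Claim_ definition above) =====
theorem get_all_uart_params_py_spec : Claim_equal_get_all_uart_params_py := by
  intro bds parities stopbits _
  unfold Spec_get_all_uart_params_py
  rw [pvAEq, pvBEq]
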